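-- pv_equiv track=rewrite | github.com/jeff-tengan/PolicyRail | src/policyrail/mcp/transports.py | _iter_sse_data
-- ===== SOURCE A (Python) =====
-- from typing import Any, Iterable
--
-- def _iter_sse_data(payload: str) -> Iterable[str]:
--     data_lines: list[str] = []
--     for line in payload.splitlines():
--         if not line:
--             if data_lines:
--                 yield "\n".join(data_lines)
--                 data_lines = []
--             continue
--         if line.startswith(":"):
--             continue
--         if line.startswith("data:"):
--             data_lines.append(line[5:].lstrip())
--     if data_lines:
--         yield "\n".join(data_lines)
-- ===== SOURCE B (Python) =====
-- def _iter_sse_data(payload: str):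
--     lines = payload.splitlines()
--     while lines:
--         if "" in lines:
--             i = lines.index("")
--             block, lines = lines[:i], lines[i + 1:]
--         else:
--             block, lines = lines, []
--         entries = [l[5:].lstrip() for l in block if l.startswith("data:")]
--         if entries:
--             yield "\n".join(entries)
-- ===== Notes on version B (the rewrite author's own statement) =====
-- stated objective: alternative
-- what changed: Replaces A's stateful per-line accumulator scan with block decomposition: repeatedly split the line list at the first blank line and extract each block's data payloads with a single comprehension.
import Mathlib
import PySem

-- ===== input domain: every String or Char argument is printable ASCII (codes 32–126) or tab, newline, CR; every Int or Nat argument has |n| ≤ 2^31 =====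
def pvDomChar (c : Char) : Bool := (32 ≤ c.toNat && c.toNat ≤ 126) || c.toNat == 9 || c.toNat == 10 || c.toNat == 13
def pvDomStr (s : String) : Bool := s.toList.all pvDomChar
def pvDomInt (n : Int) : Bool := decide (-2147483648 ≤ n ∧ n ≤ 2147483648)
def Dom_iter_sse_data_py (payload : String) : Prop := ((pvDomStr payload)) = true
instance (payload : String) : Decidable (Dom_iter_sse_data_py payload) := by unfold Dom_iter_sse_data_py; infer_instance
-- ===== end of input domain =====

-- B replaces A's stateful per-line accumulator with block decomposition at blank lines (alternative, same cost).


-- ===== PORT A =====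
-- one step of A's loop over splitlines: state = (data_lines, yielded so far)
def pvStepA (st : List String × List String) (line : String) : List String × List String :=
  if line = "" then
    (if st.1 = [] then st else ([], st.2 ++ [PySem.Str.join "\n" st.1]))
  else if PySem.Str.startswith line ":" then st
  else if PySem.Str.startswith line "data:" then
    (st.1 ++ [PySem.Str.lstrip (PySem.Str.slice line (some 5) none)], st.2)
  else st

def iter_sse_data_py (payload : String) : List String :=
  let r := (PySem.Str.splitlines payload).foldl pvStepA ([], [])
  if r.1 = [] then r.2 else r.2 ++ [PySem.Str.join "\n" r.1]

-- ===== PORT B =====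
-- the comprehension: payloads of the block's data lines
def pvEntries (block : List String) : List String :=
  (block.filter (fun l => PySem.Str.startswith l "data:")).map
    (fun l => PySem.Str.lstrip (PySem.Str.slice l (some 5) none))

-- the while loop: cut off the leading block at the first blank line
def pvGoB (lines : List String) : List String :=
  if lines.isEmpty then []
  else
    match PySem.List.index? lines "" with
    | some i =>
        let es := pvEntries (lines.take i)
        (if es = [] then [] else [PySem.Str.join "\n" es]) ++ pvGoB (lines.drop (i + 1))
    | none =>
        let es := pvEntries lines
        if es = [] then [] else [PySem.Str.join "\n" es]
  termination_by lines.length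
  decreasing_by
    have hpos : 0 < lines.length := by
      rcases lines with _ | _ <;> simp_all
    simp only [List.length_drop]
    omega

def iter_sse_data_py_alt (payload : String) : List String :=
  pvGoB (PySem.Str.splitlines payload)

-- ===== PRECONDITION & SPEC =====
def Spec_iter_sse_data_py (payload : String) (out : List String) : Prop := out = iter_sse_data_py_alt payload
instance (payload : String) (out : List String) : Decidable (Spec_iter_sse_data_py payload out) := by unfold Spec_iter_sse_data_py; infer_instance

-- ===== CLAIM (what is proved, stated in full; the proofs are below) =====
def Claim_equal_iter_sse_data_py : Prop := ∀ (payload : String), Dom_iter_sse_data_py payload → Spec_iter_sse_data_py payload (iter_sse_data_py payload)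

-- ===== LEMMAS AND PROOFS =====

-- A's loop only ever appends to the output component
theorem pvFoldA_out (ls : List String) (d out : List String) :
    ls.foldl pvStepA (d, out) =
      ((ls.foldl pvStepA (d, []) ).1, out ++ (ls.foldl pvStepA (d, [])).2) := by
  induction ls generalizing d out with
  | nil => simp
  | cons l t ih =>
    simp only [List.foldl_cons]
    have hstep : pvStepA (d, out) l = ((pvStepA (d, []) l).1, out ++ (pvStepA (d, []) l).2) := by
      unfold pvStepA
      by_cases h0 : l = "" <;> simp [h0] <;> split_ifs <;> simp
    rw [hstep, ih (pvStepA (d, []) l).1 (out ++ (pvStepA (d, []) l).2),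
        ih (pvStepA (d, []) l).1 (pvStepA (d, []) l).2]
    simp

-- a line starting with ":" does not start with "data:"
theorem pvColonNotData (l : String) (h : PySem.Str.startswith l ":" = true) :
    PySem.Str.startswith l "data:" = false := by
  by_contra hb
  have hd : PySem.Str.startswith l "data:" = true := by
    cases hh : PySem.Str.startswith l "data:" <;> simp_all
  have h1 := (PySem.Chars.startswith_iff _ _).mp (by simpa using h)
  have h2 := (PySem.Chars.startswith_iff _ _).mp (by simpa using hd)
  obtain ⟨t1, h1⟩ := h1
  obtain ⟨t2, h2⟩ := h2
  rw [← h1] at h2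
  simp at h2

-- the comprehension on a cons: non-data line skipped, data line contributes its payload
theorem pvEntries_skip (l : String) (t : List String)
    (h : PySem.Str.startswith l "data:" = false) : pvEntries (l :: t) = pvEntries t := by
  unfold pvEntries
  rw [List.filter_cons_of_neg (by simpa using h)]

theorem pvEntries_data (l : String) (t : List String)
    (h : PySem.Str.startswith l "data:" = true) :
    pvEntries (l :: t) = PySem.Str.lstrip (PySem.Str.slice l (some 5) none) :: pvEntries t := by
  unfold pvEntries
  rw [List.filter_cons_of_pos (by simpa using h)]
  simp

-- over a blank-free block, A's loop just accumulates the block's entries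
theorem pvFoldA_block (block : List String) (d : List String)
    (hb : ∀ l ∈ block, l ≠ "") :
    block.foldl pvStepA (d, []) = (d ++ pvEntries block, []) := by
  induction block generalizing d with
  | nil => simp [pvEntries]
  | cons l t ih =>
    have hl : l ≠ "" := hb l (by simp)
    have ht : ∀ x ∈ t, x ≠ "" := fun x hx => hb x (by simp [hx])
    simp only [List.foldl_cons]
    by_cases hc : PySem.Str.startswith l ":" = true
    · have hstep : pvStepA (d, []) l = (d, []) := by
        unfold pvStepA; rw [if_neg hl, if_pos hc]
      rw [hstep, ih d ht, pvEntries_skip l t (pvColonNotData l hc)]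
    · by_cases hdta : PySem.Str.startswith l "data:" = true
      · have hstep : pvStepA (d, []) l =
            (d ++ [PySem.Str.lstrip (PySem.Str.slice l (some 5) none)], []) := by
          unfold pvStepA; rw [if_neg hl, if_neg hc, if_pos hdta]
        rw [hstep, ih _ ht, pvEntries_data l t hdta]
        simp
      · have hstep : pvStepA (d, []) l = (d, []) := by
          unfold pvStepA; rw [if_neg hl, if_neg hc, if_neg hdta]
        rw [hstep, ih d ht,
            pvEntries_skip l t (by cases hh : PySem.Str.startswith l "data:" <;> simp_all)]

-- A's flush of a final state
def pvFin (r : List String × List String) : List String :=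
  if r.1 = [] then r.2 else r.2 ++ [PySem.Str.join "\n" r.1]

theorem pvMain : ∀ n (lines : List String), lines.length ≤ n →
    pvFin (lines.foldl pvStepA ([], [])) = pvGoB lines := by
  intro n
  induction n with
  | zero =>
    intro lines hn
    have : lines = [] := List.eq_nil_of_length_eq_zero (by omega)
    subst this
    simp [pvFin, pvGoB]
  | succ n ih =>
    intro lines hn
    cases hidx : PySem.List.index? lines "" with
    | none =>
      have hb : ∀ l ∈ lines, l ≠ "" := by
        intro l hl he
        have := (PySem.List.index?_eq_none_iff lines "").mp hidx
        exact this (he ▸ hl)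
      rw [pvFoldA_block lines [] hb]
      cases lines with
      | nil => simp [pvFin, pvGoB, pvEntries]
      | cons x t =>
        rw [pvGoB]
        simp only [List.isEmpty_cons, if_false, hidx, Bool.false_eq_true]
        unfold pvFin
        split_ifs <;> simp_all
    | some i =>
      obtain ⟨pre, suf, hsplit, hlen, hnot⟩ := (PySem.List.index?_eq_some_iff lines "" i).mp hidx
      subst hsplit
      have hb : ∀ l ∈ pre, l ≠ "" := fun l hl he => hnot (he ▸ hl)
      have htake : List.take i (pre ++ "" :: suf) = pre := by
        rw [← hlen, List.take_left]
      have hdrop : List.drop (i + 1) (pre ++ "" :: suf) = suf := by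
        rw [← hlen, show pre ++ "" :: suf = (pre ++ [""]) ++ suf by simp,
            show pre.length + 1 = (pre ++ [""]).length by simp, List.drop_left]
      have hsuf : suf.length ≤ n := by
        have h := hn
        simp only [List.length_append, List.length_cons] at h
        omega
      rw [List.foldl_append, pvFoldA_block pre [] hb, List.foldl_cons]
      have hstep : pvStepA ([] ++ pvEntries pre, []) "" =
          ([], if pvEntries pre = [] then [] else [PySem.Str.join "\n" (pvEntries pre)]) := by
        unfold pvStepA
        split_ifs <;> simp_all
      rw [hstep, pvFoldA_out]
      have hrec := ih suf hsuf
      rw [pvGoB]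
      have hE : (pre ++ "" :: suf).isEmpty = false := by simp
      rw [hE, hidx]
      simp only [Bool.false_eq_true, if_false, htake, hdrop]
      rw [← hrec]
      unfold pvFin
      split_ifs <;> simp_all

-- ===== VERDICT (by name: the statement is the Claim_ definition above) =====
theorem iter_sse_data_py_spec : Claim_equal_iter_sse_data_py := by
  intro payload _
  unfold Spec_iter_sse_data_py iter_sse_data_py iter_sse_data_py_alt
  exact pvMain (PySem.Str.splitlines payload).length _ le_rfl
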